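-- pv_equiv track=rewrite | github.com/translate/pootle | pootle/core/url_helpers.py | get_all_pootle_paths
-- ===== SOURCE A (Python) =====
-- def get_all_pootle_paths(pootle_path):
--     """Get list of `pootle_path` for all parents."""
--     res = [pootle_path]
--
--     if pootle_path == '' or pootle_path[-1] != u'/':
--         pootle_path += u'/'
--
--     while True:
--         chunks = pootle_path.rsplit(u'/', 2)
--         slash_count = chunks[0].count(u'/')
--         pootle_path = chunks[0] + u'/'
--         if slash_count > 1:
--             res.append(pootle_path)
--         else:
--             if slash_count == 1 and pootle_path != u'/projects/':
--                 # omit chunk[0] which is a language_code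
--                 # since language is inherited from a (non cached) TreeItem
--                 # chunk[1] is a project_code
--                 res.append(u'/projects/%s/' % chunks[1])
--             break
--
--     return res
-- ===== SOURCE B (Python) =====
-- def get_all_pootle_paths(pootle_path):
--     """Get list of `pootle_path` for all parents."""
--     res = [pootle_path]
--     n = pootle_path if pootle_path.endswith('/') else pootle_path + '/'
--     slashes = [i for i, c in enumerate(n) if c == '/']
--     res += [n[:q + 1] for q in slashes[2:-1]][::-1]
--     if len(slashes) >= 3 and n[:slashes[1] + 1] != '/projects/':
--         res.append('/projects/%s/' % n[slashes[1] + 1:slashes[2]])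
--     return res
-- ===== Notes on version B (the rewrite author's own statement) =====
-- stated objective: simpler
-- what changed: B normalizes the path once, collects all slash offsets in a single enumerate pass and emits every parent as a literal prefix slice of the normalized string at those offsets, plus the one projects-level entry taken from the substring between the second and third slash, instead of A's while-loop that rsplits the remaining string again at every level.
import Mathlib
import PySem

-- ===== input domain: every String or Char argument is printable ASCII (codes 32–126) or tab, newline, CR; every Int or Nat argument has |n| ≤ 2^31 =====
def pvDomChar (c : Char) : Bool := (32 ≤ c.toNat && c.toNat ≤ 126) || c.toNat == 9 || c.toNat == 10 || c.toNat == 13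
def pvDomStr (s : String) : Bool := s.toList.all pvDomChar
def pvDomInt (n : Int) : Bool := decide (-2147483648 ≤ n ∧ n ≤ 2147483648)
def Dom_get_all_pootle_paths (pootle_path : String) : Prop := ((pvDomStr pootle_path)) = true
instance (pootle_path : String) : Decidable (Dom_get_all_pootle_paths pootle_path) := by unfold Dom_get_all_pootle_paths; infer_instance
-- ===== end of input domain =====

-- B lists the parents by slicing the normalized path at its slash offsets, collected in one
-- pass, instead of A's repeated rsplit loop; objective: simpler (no re-scan per level).

-- ===== PORT A =====
-- index of the LAST '/' in s, or none (helper for the hand port of str.rsplit('/', 2))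
def lastSlash : List Char → Option Nat
  | [] => none
  | c :: r =>
    match lastSlash r with
    | some j => some (j + 1)
    | none => if c = '/' then some 0 else none

-- hand port of s.rsplit('/', 2) (single-char separator, maxsplit 2): split at the last
-- two '/' — exact: same chunks, in order, as CPython's rsplit for this separator
def rsplit2 (s : List Char) : List (List Char) :=
  match lastSlash s with
  | none => [s]
  | some i =>
    match lastSlash (s.take i) with
    | none => [s.take i, s.drop (i + 1)]
    | some j => [s.take j, (s.take i).drop (j + 1), s.drop (i + 1)]

theorem lastSlash_none_not_mem (s : List Char) (h : lastSlash s = none) : '/' ∉ s := by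
  induction s with
  | nil => simp
  | cons c r ih =>
    simp only [lastSlash] at h
    rcases hr : lastSlash r with _ | j
    · rw [hr] at h
      by_cases hc : c = '/'
      · simp [hc] at h
      · simp [hc] at h ⊢
        exact ⟨fun he => hc he.symm, ih hr⟩
    · rw [hr] at h; simp at h

theorem lastSlash_some_decomp (s : List Char) (j : Nat) (h : lastSlash s = some j) :
    ∃ u v, s = u ++ '/' :: v ∧ u.length = j ∧ '/' ∉ v := by
  induction s generalizing j with
  | nil => simp [lastSlash] at h
  | cons c r ih =>
    simp only [lastSlash] at h
    rcases hr : lastSlash r with _ | j'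
    · rw [hr] at h
      by_cases hc : c = '/'
      · simp [hc] at h
        refine ⟨[], r, by simp [hc], by simp [h], lastSlash_none_not_mem r hr⟩
      · simp [hc] at h
    · rw [hr] at h
      simp at h
      obtain ⟨u, v, rfl, rfl, hv⟩ := ih j' hr
      exact ⟨c :: u, v, by simp, by simp; omega, hv⟩

-- termination lemma for the while-loop of A: when slash_count > 1 the new path is shorter
theorem rsplit2_head_lt (p : List Char) (h : 1 < ((rsplit2 p).headD []).count '/') :
    ((rsplit2 p).headD []).length + 1 < p.length := by
  unfold rsplit2 at h ⊢
  rcases hi : lastSlash p with _ | i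
  · simp only [hi, List.headD] at h
    have := lastSlash_none_not_mem p hi
    rw [(List.count_eq_zero).mpr this] at h; omega
  · obtain ⟨u, v, hp, hu, hv⟩ := lastSlash_some_decomp p i hi
    rcases hj : lastSlash (p.take i) with _ | j
    · simp only [hi, hj, List.headD] at h
      have := lastSlash_none_not_mem _ hj
      rw [(List.count_eq_zero).mpr this] at h; omega
    · simp only [hi, hj, List.headD] at h ⊢
      obtain ⟨u', v', hp', hu', hv'⟩ := lastSlash_some_decomp _ j hj
      have hilen : i < p.length := by subst hp; simp [← hu]
      have hjlen : j < (p.take i).length := by rw [hp']; simp [← hu']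
      simp only [List.length_take] at hjlen
      have hjl : j < i := by omega
      have : (p.take j).length = j := by simp; omega
      rw [this]; omega

def aLoop (p : List Char) (res : List (List Char)) : List (List Char) :=
  let chunks := rsplit2 p
  let c0 := chunks.headD []
  let sc := c0.count '/'
  let p' := c0 ++ ['/']
  if h : 1 < sc then
    aLoop p' (res ++ [p'])
  else
    if sc = 1 ∧ p' ≠ "/projects/".toList then
      res ++ ["/projects/".toList ++ chunks.getD 1 [] ++ ['/']]
    else
      res
termination_by p.length
decreasing_by
  have := rsplit2_head_lt p h
  simpa using this

def get_all_pootle_paths (pootle_path : String) : List String :=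
  let s := pootle_path.toList
  let p := if s = [] ∨ PySem.List.pyGet? s (-1) ≠ some '/' then s ++ ['/'] else s
  (aLoop p [s]).map String.ofList

-- ===== PORT B =====
def get_all_pootle_paths_alt (pootle_path : String) : List String :=
  let s := pootle_path.toList
  let n := if PySem.Chars.endswith s ['/'] then s else s ++ ['/']
  let slashes : List Int :=
    (PySem.List.enumerate n).filterMap (fun pr => if pr.2 == '/' then some pr.1 else none)
  let mids := (PySem.List.slice slashes (some 2) (some (-1))).map
    (fun q => PySem.List.slice n none (some (q + 1)))
  let res := s :: mids.reverse
  let res :=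
    if 3 ≤ slashes.length ∧
        PySem.List.slice n none (some (slashes.getD 1 0 + 1)) ≠ "/projects/".toList then
      res ++ ["/projects/".toList ++
        PySem.List.slice n (some (slashes.getD 1 0 + 1)) (some (slashes.getD 2 0)) ++ ['/']]
    else res
  res.map String.ofList

-- ===== PRECONDITION & SPEC =====
def Spec_get_all_pootle_paths (pootle_path : String) (out : List String) : Prop := out = get_all_pootle_paths_alt pootle_path
instance (pootle_path : String) (out : List String) : Decidable (Spec_get_all_pootle_paths pootle_path out) := by unfold Spec_get_all_pootle_paths; infer_instance

-- ===== CLAIM (what is proved, stated in full; the proofs are below) =====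
def Claim_equal_get_all_pootle_paths : Prop := ∀ (pootle_path : String), Dom_get_all_pootle_paths pootle_path → Spec_get_all_pootle_paths pootle_path (get_all_pootle_paths pootle_path)

-- ===== LEMMAS AND PROOFS =====

-- slash offsets of u, counted from k (proof-side mirror of B's enumerate/filter pass)
def qsOff : List Char → Nat → List Nat
  | [], _ => []
  | c :: r, k => (if c = '/' then [k] else []) ++ qsOff r (k + 1)

theorem qsOff_append (u v : List Char) (k : Nat) :
    qsOff (u ++ v) k = qsOff u k ++ qsOff v (k + u.length) := by
  induction u generalizing k with
  | nil => simp [qsOff]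
  | cons c r ih => simp [qsOff, ih, Nat.add_assoc, Nat.add_comm 1]

theorem length_qsOff (u : List Char) (k : Nat) : (qsOff u k).length = u.count '/' := by
  induction u generalizing k with
  | nil => simp [qsOff]
  | cons c r ih =>
    by_cases hc : c = '/' <;> simp [qsOff, hc, ih, List.count_cons]

theorem qsOff_eq_nil (u : List Char) (k : Nat) (h : '/' ∉ u) : qsOff u k = [] := by
  have := length_qsOff u k
  rw [(List.count_eq_zero).mpr h] at this
  exact List.eq_nil_of_length_eq_zero this

theorem mem_qsOff (u : List Char) (k q : Nat) (h : q ∈ qsOff u k) : k ≤ q ∧ q < k + u.length := by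
  induction u generalizing k with
  | nil => simp [qsOff] at h
  | cons c r ih =>
    simp only [qsOff, List.mem_append] at h
    rcases h with h | h
    · by_cases hc : c = '/' <;> simp [hc] at h
      simp [h]
    · have := ih (k + 1) h
      constructor <;> [omega; (simp; omega)]

theorem enum_filterMap_eq (u : List Char) (k : Nat) :
    (PySem.List.enumerate u (k : Int)).filterMap
        (fun pr => if pr.2 == '/' then some pr.1 else none) =
      (qsOff u k).map (Nat.cast : Nat → Int) := by
  induction u generalizing k with
  | nil => simp [qsOff, PySem.List.enumerate]
  | cons c r ih =>
    rw [PySem.List.enumerate_cons, List.filterMap_cons]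
    have ih' := ih (k + 1)
    rw [show ((k + 1 : Nat) : Int) = (k : Int) + 1 from by push_cast; ring] at ih'
    by_cases hc : c = '/'
    · simp only [hc, qsOff, List.map_cons, List.singleton_append,
        beq_self_eq_true, if_true, ih']
    · simp only [qsOff, if_neg hc, List.nil_append, ih']
      have : (((k : Int), c).2 == '/') = false := by simpa using hc
      simp [this]

-- the tail of the result (everything after the original path), stated over Nat offsets
def tailSpec (n : List Char) (qs : List Nat) : List (List Char) :=
  (((qs.drop 2).dropLast).map (fun q => n.take (q + 1))).reverse ++
    (if 3 ≤ qs.length ∧ n.take (qs.getD 1 0 + 1) ≠ "/projects/".toList then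
      ["/projects/".toList ++ ((n.drop (qs.getD 1 0 + 1)).take (qs.getD 2 0 - (qs.getD 1 0 + 1))) ++ ['/']]
    else [])

theorem lastSlash_append_slash (u v : List Char) (hv : '/' ∉ v) :
    lastSlash (u ++ '/' :: v) = some u.length := by
  induction u with
  | nil =>
    have : lastSlash v = none := by
      rcases h : lastSlash v with _ | j
      · rfl
      · obtain ⟨a, b, hab, _, _⟩ := lastSlash_some_decomp v j h
        exact absurd (by rw [hab]; simp) hv
    simp [lastSlash, this]
  | cons c r ih => simp [lastSlash, ih]

theorem rsplit2_snoc (t : List Char) :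
    rsplit2 (t ++ ['/']) =
      match lastSlash t with
      | none => [t, []]
      | some j => [t.take j, t.drop (j + 1), []] := by
  have h1 : lastSlash (t ++ ['/']) = some t.length := by
    simpa using lastSlash_append_slash t [] (by simp)
  have h2 : (t ++ ['/']).take t.length = t := List.take_left
  have h3 : (t ++ ['/']).drop (t.length + 1) = [] := by
    rw [show t.length + 1 = (t ++ ['/']).length by simp, List.drop_length]
  unfold rsplit2
  rw [h1]
  rcases h : lastSlash t with _ | j
  · simp [h2, h3, h]
  · have hj : j < t.length := by
      obtain ⟨u, v, rfl, rfl, _⟩ := lastSlash_some_decomp t j h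
      simp
    simp [h2, h3, h]
    omega

theorem rsplit2_snoc_none (t : List Char) (h : lastSlash t = none) :
    rsplit2 (t ++ ['/']) = [t, []] := by
  rw [rsplit2_snoc, h]

theorem rsplit2_snoc_some (t : List Char) (j : Nat) (h : lastSlash t = some j) :
    rsplit2 (t ++ ['/']) = [t.take j, t.drop (j + 1), []] := by
  rw [rsplit2_snoc, h]

-- one unrolling of A's while-loop, assuming the claim for all shorter paths
theorem aLoop_step (t : List Char) (res : List (List Char))
    (IH : ∀ t' : List Char, t'.length < t.length → ∀ res' : List (List Char),
      aLoop (t' ++ ['/']) res' = res' ++ tailSpec (t' ++ ['/']) (qsOff (t' ++ ['/']) 0)) :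
    aLoop (t ++ ['/']) res = res ++ tailSpec (t ++ ['/']) (qsOff (t ++ ['/']) 0) := by
  rw [aLoop]
  rcases h : lastSlash t with _ | j
  · -- no slash in t: the loop breaks immediately with no extra element
    have hsplit := rsplit2_snoc_none t h
    have hv := lastSlash_none_not_mem t h
    have hc : t.count '/' = 0 := List.count_eq_zero.mpr hv
    rw [qsOff_append, qsOff_eq_nil t 0 hv]
    simp [hsplit, hc, tailSpec, qsOff]
  · obtain ⟨u, v, rfl, rfl, hv⟩ := lastSlash_some_decomp t j h
    have hsplit := rsplit2_snoc_some (u ++ '/' :: v) u.length h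
    have htake : (u ++ '/' :: v).take u.length = u := List.take_left
    have hdrop : (u ++ '/' :: v).drop (u.length + 1) = v := by
      rw [show u ++ '/' :: v = (u ++ ['/']) ++ v by simp,
        show u.length + 1 = (u ++ ['/']).length by simp, List.drop_left]
    rw [htake, hdrop] at hsplit
    -- slash offsets of the normalized path
    have hqs : qsOff ((u ++ '/' :: v) ++ ['/']) 0 =
        (qsOff u 0 ++ [u.length]) ++ [(u ++ '/' :: v).length] := by
      rw [qsOff_append, qsOff_append, Nat.zero_add]
      simp [qsOff, qsOff_eq_nil v (u.length + 1) hv]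
    set w := qsOff u 0 with hw
    have hwlen : w.length = u.count '/' := length_qsOff u 0
    have hwmem : ∀ q ∈ w, q < u.length := fun q hq => by
      have := mem_qsOff u 0 q hq; omega
    have htake1 : ∀ z : List Char, ((u ++ z).take (u.length + 1)) = u ++ z.take 1 := by
      intro z; rw [List.take_append]; simp
    rw [hqs, hsplit]
    simp only [List.headD_cons, List.getD_cons_succ, List.getD_cons_zero]
    by_cases h2 : 1 < u.count '/'
    · -- slash_count > 1: append the parent and loop on it
      rw [dif_pos h2, IH u (by simp) (res ++ [u ++ ['/']])]
      have hq' : qsOff (u ++ ['/']) 0 = w ++ [u.length] := by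
        rw [qsOff_append]; simp [qsOff, ← hw]
      rw [hq']
      have hx2 : 2 ≤ w.length := by omega
      -- both tails coincide
      have hmids : ∀ z : List Char,
          ((w.drop 2).map (fun q => ((u ++ z).take (q + 1)))) =
          ((w.drop 2).map (fun q => (u.take (q + 1)))) := by
        intro z
        refine List.map_congr_left (fun q hq => ?_)
        have : q < u.length := hwmem q (List.mem_of_mem_drop hq)
        rw [List.take_append_of_le_length (by omega)]
      have hdl : ((((w ++ [u.length]) ++ [(u ++ '/' :: v).length]).drop 2).dropLast)
          = w.drop 2 ++ [u.length] := by
        rw [List.drop_append_of_le_length (by simp; omega), List.dropLast_concat,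
          List.drop_append_of_le_length (by omega)]
      have hdl' : (((w ++ [u.length]).drop 2).dropLast) = w.drop 2 := by
        rw [List.drop_append_of_le_length (by omega), List.dropLast_concat]
      have hg1 : ((w ++ [u.length]) ++ [(u ++ '/' :: v).length]).getD 1 0 = w.getD 1 0 := by
        rw [List.getD_append _ _ _ 1 (by simp; omega), List.getD_append _ _ _ 1 (by omega)]
      have hg1' : (w ++ [u.length]).getD 1 0 = w.getD 1 0 :=
        List.getD_append _ _ _ 1 (by omega)
      have hg2 : ((w ++ [u.length]) ++ [(u ++ '/' :: v).length]).getD 2 0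
          = (w ++ [u.length]).getD 2 0 :=
        List.getD_append _ _ _ 2 (by simp; omega)
      have hq1lt : (w ++ [u.length]).getD 1 0 < u.length := by
        rw [hg1']
        exact hwmem _ (by rw [List.getD_eq_getElem w 0 (by omega)]; exact List.getElem_mem _)
      have hq2le : (w ++ [u.length]).getD 2 0 ≤ u.length := by
        by_cases h3 : 2 < w.length
        · rw [List.getD_append _ _ _ 2 h3]
          exact le_of_lt (hwmem _ (by rw [List.getD_eq_getElem w 0 h3]; exact List.getElem_mem _))
        · have hlen2 : w.length = 2 := by omega
          have : (w ++ [u.length]).getD 2 0 = u.length := by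
            rw [List.getD_eq_getElem _ 0 (by simp [hlen2])]
            rw [List.getElem_append_right (by omega)]
            simp [hlen2]
          omega
      unfold tailSpec
      rw [hdl, hdl', hg1, hg1', hg2]
      have hpre : ∀ z : List Char, (u ++ z).take ((w.getD 1 0) + 1) = u.take (w.getD 1 0 + 1) := by
        intro z
        have : w.getD 1 0 < u.length := by rw [← hg1']; exact hq1lt
        exact List.take_append_of_le_length (by omega)
      have hseg : ∀ z : List Char,
          ((u ++ z).drop (w.getD 1 0 + 1)).take ((w ++ [u.length]).getD 2 0 - (w.getD 1 0 + 1))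
          = (u.drop (w.getD 1 0 + 1)).take ((w ++ [u.length]).getD 2 0 - (w.getD 1 0 + 1)) := by
        intro z
        have hq1 : w.getD 1 0 < u.length := by rw [← hg1']; exact hq1lt
        rw [List.drop_append_of_le_length (by omega)]
        rw [List.take_append_of_le_length (by rw [List.length_drop]; omega)]
      have hcond : (3 ≤ ((w ++ [u.length]) ++ [(u ++ '/' :: v).length]).length) = True := by
        simp; omega
      have hcond' : (3 ≤ (w ++ [u.length]).length) = True := by simp; omega
      rw [show ((u ++ '/' :: v) ++ ['/']) = u ++ ('/' :: v ++ ['/']) by simp]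
      rw [List.map_append, hmids, hmids ('/' :: v ++ ['/'])]
      simp only [hcond, hcond', true_and, List.map_cons, List.map_nil, List.reverse_append,
        List.reverse_cons, List.reverse_nil, List.nil_append, List.singleton_append]
      rw [htake1, hpre ('/' :: v ++ ['/']), hpre ['/'], hseg ('/' :: v ++ ['/']), hseg ['/']]
      simp
    · rw [dif_neg h2]
      by_cases h1 : u.count '/' = 1
      · -- slash_count == 1: maybe emit the /projects/<code>/ entry, then break
        have hwl : w.length = 1 := by omega
        obtain ⟨q0, hq0⟩ : ∃ q0, w = [q0] := by
          rcases w with _ | ⟨a, _ | _⟩ <;> simp at hwl ⊢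
        rw [hq0]
        unfold tailSpec
        simp only [List.cons_append, List.nil_append, List.singleton_append, List.append_assoc,
          List.drop, List.dropLast_singleton, List.map_nil, List.reverse_nil,
          List.getD_cons_succ, List.getD_cons_zero, List.length_cons, List.length_append]
        have hpr : List.take (u.length + 1) (u ++ '/' :: (v ++ ['/'])) = u ++ ['/'] := by
          rw [htake1]; simp
        have hsg : List.take (u.length + (v.length + 1) - (u.length + 1))
            (List.drop (u.length + 1) (u ++ '/' :: (v ++ ['/']))) = v := by
          rw [show u.length + (v.length + 1) - (u.length + 1) = v.length by omega,
            show u ++ '/' :: (v ++ ['/']) = (u ++ ['/']) ++ (v ++ ['/']) by simp,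
            show u.length + 1 = (u ++ ['/']).length by simp, List.drop_left, List.take_left]
        rw [hpr, hsg]
        by_cases hp : u ++ ['/'] = "/projects/".toList <;>
          rw [show "/projects/".toList = ['/', 'p', 'r', 'o', 'j', 'e', 'c', 't', 's', '/']
            from rfl] at hp <;> simp [hp, h1]
      · -- slash_count == 0: break with nothing
        have hwl : w.length = 0 := by omega
        rw [List.eq_nil_of_length_eq_zero hwl]
        rw [if_neg (by simp [h1])]
        unfold tailSpec
        simp

theorem aLoop_eq (t : List Char) (res : List (List Char)) :
    aLoop (t ++ ['/']) res = res ++ tailSpec (t ++ ['/']) (qsOff (t ++ ['/']) 0) := by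
  suffices h : ∀ (N : Nat) (t : List Char), t.length ≤ N → ∀ res : List (List Char),
      aLoop (t ++ ['/']) res = res ++ tailSpec (t ++ ['/']) (qsOff (t ++ ['/']) 0) from
    h t.length t le_rfl res
  intro N
  induction N with
  | zero =>
    intro t ht res
    exact aLoop_step t res (fun t' h' res' => absurd h' (by omega))
  | succ N ih =>
    intro t ht res
    exact aLoop_step t res (fun t' h' res' => ih t' (by omega) res')

theorem slice_two_negone {α : Type} (xs : List α) :
    PySem.List.slice xs (some 2) (some (-1)) = (xs.drop 2).dropLast := by
  rcases xs with _ | ⟨a, _ | ⟨b, l⟩⟩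
  · rfl
  · rfl
  · show PySem.List.slice (a :: b :: l) (some 2) (some (-1)) = l.dropLast
    simp only [PySem.List.slice, PySem.List.clampIdx]
    norm_num
    have e2 : min (Int.toNat 2) (l.length + 1 + 1) = 2 := by
      rw [show Int.toNat 2 = 2 from rfl]; omega
    simp only [e2, if_neg (show ¬((l.length : Int) + 1 < 0) by omega)]
    rw [List.dropLast_eq_take]
    simp only [List.drop_succ_cons, List.drop_zero]
    congr 1

theorem getD_map_cast (l : List Nat) (i : Nat) :
    (l.map (Nat.cast : Nat → Int)).getD i 0 = ((l.getD i 0 : Nat) : Int) := by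
  simp only [List.getD_eq_getElem?_getD, List.getElem?_map]
  cases l[i]? <;> simp

theorem endswith_slash_iff (xs : List Char) :
    PySem.Chars.endswith xs ['/'] = true ↔ xs ≠ [] ∧ PySem.List.pyGet? xs (-1) = some '/' := by
  rw [PySem.Chars.endswith_iff]
  constructor
  · rintro ⟨w, rfl⟩
    refine ⟨by simp, ?_⟩
    simp [PySem.List.pyGet?, PySem.List.pyIdx?]
  · rintro ⟨hne, hg⟩
    obtain ⟨w, c, rfl⟩ : ∃ w c, xs = w ++ [c] :=
      ⟨xs.dropLast, xs.getLast hne, (List.dropLast_append_getLast hne).symm⟩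
    have hc : c = '/' := by
      simp [PySem.List.pyGet?, PySem.List.pyIdx?] at hg
      exact hg
    exact ⟨w, by rw [hc]⟩

theorem alt_eq_tailSpec (s : String) (t : List Char)
    (hB : (if PySem.Chars.endswith s.toList ['/'] then s.toList else s.toList ++ ['/'])
      = t ++ ['/']) :
    get_all_pootle_paths_alt s
      = (s.toList :: tailSpec (t ++ ['/']) (qsOff (t ++ ['/']) 0)).map String.ofList := by
  unfold get_all_pootle_paths_alt
  simp only [hB]
  have hsl := enum_filterMap_eq (t ++ ['/']) 0
  rw [Nat.cast_zero] at hsl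
  set qs := qsOff (t ++ ['/']) 0 with hqsdef
  rw [hsl, slice_two_negone, ← List.map_drop, ← List.map_dropLast, List.map_map]
  have hmap : ((qs.drop 2).dropLast).map
      ((fun q => PySem.List.slice (t ++ ['/']) none (some (q + 1))) ∘ (Nat.cast : Nat → Int))
      = ((qs.drop 2).dropLast).map (fun q => (t ++ ['/']).take (q + 1)) := by
    refine List.map_congr_left (fun q _ => ?_)
    simp only [Function.comp]
    rw [show ((q : Int) + 1) = ((q + 1 : Nat) : Int) from by push_cast; ring,
      PySem.List.slice_to_natCast]
  rw [hmap, List.length_map, getD_map_cast, getD_map_cast]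
  rw [show ((qs.getD 1 0 : Nat) : Int) + 1 = ((qs.getD 1 0 + 1 : Nat) : Int) from by
    push_cast; ring]
  rw [PySem.List.slice_to_natCast, PySem.List.slice_natCast]
  unfold tailSpec
  split_ifs <;> simp

-- ===== VERDICT (by name: the statement is the Claim_ definition above) =====
theorem get_all_pootle_paths_spec : Claim_equal_get_all_pootle_paths := by
  intro s _
  unfold Spec_get_all_pootle_paths
  by_cases hE : PySem.Chars.endswith s.toList ['/'] = true
  · obtain ⟨hne, hg⟩ := (endswith_slash_iff s.toList).mp hE
    obtain ⟨w, hw⟩ := (PySem.Chars.endswith_iff s.toList ['/']).mp hE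
    have hBnorm : (if PySem.Chars.endswith s.toList ['/'] then s.toList
        else s.toList ++ ['/']) = w ++ ['/'] := by
      simp only [hE, if_true]; exact hw.symm
    rw [alt_eq_tailSpec s w hBnorm]
    unfold get_all_pootle_paths
    have hA : (if s.toList = [] ∨ PySem.List.pyGet? s.toList (-1) ≠ some '/' then
        s.toList ++ ['/'] else s.toList) = w ++ ['/'] := by
      rw [if_neg (by push_neg; exact ⟨hne, hg⟩)]
      exact hw.symm
    simp only [hA, aLoop_eq]
    simp
  · have hAcond : s.toList = [] ∨ PySem.List.pyGet? s.toList (-1) ≠ some '/' := by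
      by_contra hcon
      push_neg at hcon
      exact hE ((endswith_slash_iff s.toList).mpr ⟨hcon.1, hcon.2⟩)
    have hBnorm : (if PySem.Chars.endswith s.toList ['/'] then s.toList
        else s.toList ++ ['/']) = s.toList ++ ['/'] := by
      simp [hE]
    rw [alt_eq_tailSpec s s.toList hBnorm]
    unfold get_all_pootle_paths
    simp only [if_pos hAcond, aLoop_eq]
    simp
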